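-- pv_equiv track=rewrite | github.com/blldd/CodeExercise | LeetCode_b/2019offer/tencent/5.py | process
-- ===== SOURCE A (Python) =====
-- def largestRectangleAreaStack(heights):
--     '''O(N) 栈'''
--     l = len(heights)
--     if l < 1:
--         return 0
--
--     ma = 0
--     stack = []
--     heights = [0] + heights + [0]
--     l = len(heights)
--
--     for i in range(l):
--         while stack and heights[stack[-1]] > heights[i]:
--             top = stack.pop()
--             ma = max(ma, (i - stack[-1] - 1) * heights[top])
--
--         stack.append(i)
--     return ma
--
-- def maximalRectangle(matrix, c):
--     '''借用上面栈的方法 时间复杂度O(N^2)'''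
--     if len(matrix) < 1:
--         return 0
--
--     m = len(matrix)
--     n = len(matrix[0])
--
--     ma = 0
--     heights = [0 for i in range(n)]
--     for i in range(m):
--         for j in range(n):
--             if matrix[i][j] == c:
--                 heights[j] += 1
--
--             else:
--                 heights[j] = 0
--         tmp = largestRectangleAreaStack(heights)
--         ma = max(ma, tmp)
--     return ma
--
-- def process(arr, N):
--     mi = min(map(min, arr))
--     if mi < 0:
--         arr = [list(map(lambda x: x + 1, i)) for i in arr]
--
--     ma = max(map(max, arr))
--
--     mat = [[0 for _ in range(ma)] for _ in range(ma)]
--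
--     c_set = set()
--     for tmp in arr:
--         x0, y0, x1, y1, c = tmp
--         for i in range(x0, x1):
--             for j in range(y0, y1):
--                 mat[i][j] = c
--         c_set.add(c)
--
--     res = 0
--     for c in c_set:
--         tmp = maximalRectangle(mat, c)
--         res = max(res, tmp)
--
--     return res
-- ===== SOURCE B (Python) =====
-- def process(arr, N):
--     if min(x for row in arr for x in row) < 0:
--         arr = [[x + 1 for x in row] for row in arr]
--     ma = max(x for row in arr for x in row)
--     mat = [[0] * ma for _ in range(ma)]
--     colors = set()
--     for x0, y0, x1, y1, c in arr:
--         for i in range(x0, x1):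
--             for j in range(y0, y1):
--                 mat[i][j] = c
--         colors.add(c)
--     best = 0
--     for c in colors:
--         heights = [0] * ma
--         for row in mat:
--             for j in range(ma):
--                 heights[j] = heights[j] + 1 if row[j] == c else 0
--             for j in range(ma):
--                 m = heights[j]
--                 for k in range(j, ma):
--                     m = min(m, heights[k])
--                     best = max(best, (k - j + 1) * m)
--     return best
-- ===== Notes on version B (the rewrite author's own statement) =====
-- stated objective: simpler
-- what changed: Replaces the sentinel-padded monotonic-stack largest-rectangle-in-histogram helper by a direct running-minimum scan over all column intervals of each row histogram, threading one global maximum through colors and rows; the stack helper and padding disappear.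
import Mathlib
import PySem

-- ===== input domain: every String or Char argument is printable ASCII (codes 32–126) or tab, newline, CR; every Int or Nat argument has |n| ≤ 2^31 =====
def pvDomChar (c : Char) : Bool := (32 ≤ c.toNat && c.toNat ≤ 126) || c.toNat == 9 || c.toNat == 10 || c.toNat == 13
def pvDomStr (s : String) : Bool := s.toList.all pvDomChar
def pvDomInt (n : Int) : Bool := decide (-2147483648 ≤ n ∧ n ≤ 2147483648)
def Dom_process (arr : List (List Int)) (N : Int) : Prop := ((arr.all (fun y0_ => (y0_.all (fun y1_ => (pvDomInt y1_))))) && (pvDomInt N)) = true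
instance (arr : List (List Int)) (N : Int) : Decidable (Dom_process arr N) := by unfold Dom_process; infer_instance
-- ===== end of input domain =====

-- B replaces the monotonic-stack histogram helper by a direct running-minimum interval scan (simpler, not faster).
-- Python A mutates nothing observable by the caller; equivalence is about the return value.

-- shared rasterisation (identical lines in both Pythons): paint mat[i][j] = c with Python index semantics
def paintCell (mat : List (List Int)) (i j c : Int) : List (List Int) :=
  PySem.List.pySetD mat i (PySem.List.pySetD (PySem.List.pyGetD mat i []) j c)

def paintRect (mat : List (List Int)) (x0 y0 x1 y1 c : Int) : List (List Int) :=
  (PySem.List.pyRange x0 x1 1).foldl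
    (fun m i => (PySem.List.pyRange y0 y1 1).foldl (fun m2 j => paintCell m2 i j c) m) mat

def rasterize (arr2 : List (List Int)) (m : Nat) : List (List Int) × List Int :=
  arr2.foldl
    (fun s row =>
      match row with
      | [x0, y0, x1, y1, c] => (paintRect s.1 x0 y0 x1 y1 c, PySem.Set.add s.2 c)
      | _ => s)   -- Python raises ValueError here (unpacking); excluded by Pre_process
    (List.replicate m (List.replicate m 0), (PySem.Set.empty : PySem.Set Int))

-- ===== PORT A =====
-- while stack and heights[stack[-1]] > heights[i]: … (stack held top-first; pops never under-run inside process)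
def lraPops (H : List Int) (i : Nat) : Int → List Nat → Int × List Nat
  | ma, [] => (ma, [])
  | ma, top :: rest =>
    if H.getD top 0 > H.getD i 0 then
      lraPops H i (max ma (((i : Int) - ((rest.headD 0 : Nat) : Int) - 1) * H.getD top 0)) rest
    else (ma, top :: rest)

def largestRectangleAreaStack (heights : List Int) : Int :=
  if heights.length < 1 then 0
  else
    let H := 0 :: heights ++ [0]
    ((List.range H.length).foldl (fun s i => let t := lraPops H i s.1 s.2; (t.1, i :: t.2))
      ((0 : Int), ([] : List Nat))).1

def maximalRectangle (matrix : List (List Int)) (c : Int) : Int :=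
  if matrix.length < 1 then 0
  else
    let n := (matrix.headD []).length
    (matrix.foldl
      (fun (s : Int × List Int) row =>
        let h := (List.range n).map (fun j => if row.getD j 0 = c then s.2.getD j 0 + 1 else 0)
        (max s.1 (largestRectangleAreaStack h), h))
      (0, List.replicate n 0)).1

def process (arr : List (List Int)) (N : Int) : Int :=
  let mi := (PySem.List.min? (arr.map (fun r => (PySem.List.min? r (fun x => x)).getD 0)) (fun x => x)).getD 0
  let arr2 := if mi < 0 then arr.map (fun r => r.map (fun x => x + 1)) else arr
  let mx := (PySem.List.max? (arr2.map (fun r => (PySem.List.max? r (fun x => x)).getD 0)) (fun x => x)).getD 0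
  let mc := rasterize arr2 mx.toNat
  mc.2.foldl (fun res c => max res (maximalRectangle mc.1 c)) 0

-- ===== PORT B =====
-- for j in range(ma): m = heights[j]; for k in range(j, ma): m = min(m, heights[k]); best = max(best, (k-j+1)*m)
def bestUpTo (heights : List Int) (n : Nat) (best : Int) : Int :=
  (List.range n).foldl
    (fun b j =>
      ((List.range' j (n - j)).foldl
        (fun (s : Int × Int) k =>
          let m := min s.2 (heights.getD k 0)
          (max s.1 (((k : Int) - (j : Int) + 1) * m), m))
        (b, heights.getD j 0)).1)
    best

def process_alt (arr : List (List Int)) (N : Int) : Int :=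
  let mi := (PySem.List.min? (arr.flatMap (fun r => r)) (fun x => x)).getD 0
  let arr2 := if mi < 0 then arr.map (fun r => r.map (fun x => x + 1)) else arr
  let mx := (PySem.List.max? (arr2.flatMap (fun r => r)) (fun x => x)).getD 0
  let mc := rasterize arr2 mx.toNat
  mc.2.foldl
    (fun best c =>
      (mc.1.foldl
        (fun (s : Int × List Int) row =>
          let h := (List.range mx.toNat).map (fun j => if row.getD j 0 = c then s.2.getD j 0 + 1 else 0)
          (bestUpTo h mx.toNat s.1, h))
        (best, List.replicate mx.toNat 0)).1)
    0

-- ===== PRECONDITION & SPEC =====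
def pvMinAll (arr : List (List Int)) : Int :=
  (PySem.List.min? (arr.flatMap (fun r => r)) (fun x => x)).getD 0
def pvShiftv (arr : List (List Int)) : Int := if pvMinAll arr < 0 then 1 else 0
def pvMaxAll (arr : List (List Int)) : Int :=
  (PySem.List.max? (arr.flatMap (fun r => r)) (fun x => x)).getD 0 + pvShiftv arr

-- Pre_process = exactly the inputs on which the Python A returns: arr nonempty, every row of length 5
-- (else min()/unpacking raises), and every actually-painted rectangle start stays ≥ -ma after the +1
-- shift (else mat[i][j] raises IndexError; starts in [-ma,0) wrap around, which A and B both do).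
def Pre_process (arr : List (List Int)) (N : Int) : Prop :=
  arr ≠ [] ∧ ∀ row ∈ arr, row.length = 5 ∧
    ((row.getD 0 0 < row.getD 2 0 ∧ row.getD 1 0 < row.getD 3 0) →
      -(pvMaxAll arr) ≤ row.getD 0 0 + pvShiftv arr ∧ -(pvMaxAll arr) ≤ row.getD 1 0 + pvShiftv arr)

instance (arr : List (List Int)) (N : Int) : Decidable (Pre_process arr N) := by
  unfold Pre_process; infer_instance

def pvWitness_process : List (List Int) × Int := ([[0, 0, 2, 2, 1]], 0)

def Spec_process (arr : List (List Int)) (N : Int) (out : Int) : Prop := out = process_alt arr N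
instance (arr : List (List Int)) (N : Int) (out : Int) : Decidable (Spec_process arr N out) := by
  unfold Spec_process; infer_instance

-- ===== CLAIM (what is proved, stated in full; the proofs are below) =====
def Claim_equal_process : Prop :=
  ∀ (arr : List (List Int)) (N : Int), Dom_process arr N → Pre_process arr N →
    Spec_process arr N (process arr N)

-- ===== LEMMAS AND PROOFS =====

-- ---------- generic fold-max facts ----------
theorem foldl_max_init_le (l : List Int) (b : Int) : b ≤ l.foldl max b := by
  induction l generalizing b with
  | nil => exact le_refl b
  | cons x t ih => exact le_trans (le_max_left b x) (ih (max b x))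

theorem foldl_max_le (l : List Int) (b x : Int) (hb : b ≤ x) (hl : ∀ y ∈ l, y ≤ x) :
    l.foldl max b ≤ x := by
  induction l generalizing b with
  | nil => exact hb
  | cons a t ih =>
    exact ih (max b a) (max_le hb (hl a (by simp))) (fun y hy => hl y (by simp [hy]))

theorem foldl_max_mem_le (l : List Int) (b y : Int) (hy : y ∈ l) : y ≤ l.foldl max b := by
  induction l generalizing b with
  | nil => cases hy
  | cons a t ih =>
    rcases List.mem_cons.1 hy with rfl | h
    · exact le_trans (le_max_right b y) (foldl_max_init_le t (max b y))
    · exact ih (max b a) h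

theorem foldl_max_hoist (l : List Int) (b : Int) (hb : 0 ≤ b) :
    l.foldl max b = max b (l.foldl max 0) := by
  induction l generalizing b with
  | nil => simp only [List.foldl_nil]; exact (max_eq_left hb).symm
  | cons x t ih =>
    simp only [List.foldl_cons]
    rw [ih (max b x) (le_trans hb (le_max_left b x)), ih (max 0 x) (le_max_left 0 x)]
    rw [← max_assoc, ← max_assoc]
    congr 1
    omega

-- ---------- segment minima and the interval-area upper-bound predicate ----------
def segMin (f : Nat → Int) (a : Nat) : Nat → Int
  | 0 => f a
  | k + 1 => min (segMin f a k) (f (a + k + 1))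

theorem segMin_le (f : Nat → Int) (a k j : Nat) (h1 : a ≤ j) (h2 : j ≤ a + k) :
    segMin f a k ≤ f j := by
  induction k with
  | zero => have : j = a := by omega
            simp [this, segMin]
  | succ k ih =>
    by_cases hj : j ≤ a + k
    · exact le_trans (min_le_left _ _) (ih hj)
    · have : j = a + k + 1 := by omega
      simp [segMin, this]

theorem le_segMin (f : Nat → Int) (a k : Nat) (c : Int)
    (h : ∀ j, a ≤ j → j ≤ a + k → c ≤ f j) : c ≤ segMin f a k := by
  induction k with
  | zero => exact h a (le_refl a) (by omega)
  | succ k ih =>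
    exact le_min (ih (fun j hj1 hj2 => h j hj1 (by omega))) (h (a + k + 1) (by omega) (by omega))

theorem segMin_succ (f : Nat → Int) (a k : Nat) :
    segMin f a (k + 1) = min (segMin f a k) (f (a + k + 1)) := rfl

theorem segMin_congr (f g : Nat → Int) (a k : Nat) (h : ∀ j, a ≤ j → j ≤ a + k → f j = g j) :
    segMin f a k = segMin g a k := by
  induction k with
  | zero => simp [segMin, h a (le_refl a) (by omega)]
  | succ k ih =>
    simp [segMin, ih (fun j h1 h2 => h j h1 (by omega)), h (a + k + 1) (by omega) (by omega)]

-- x is an upper bound of all interval areas of the padded histogram f on [1, n]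
def UBp (f : Nat → Int) (n : Nat) (x : Int) : Prop :=
  0 ≤ x ∧ ∀ a k, 1 ≤ a → a + k ≤ n → ((k : Int) + 1) * segMin f a k ≤ x

-- ---------- the padded histogram ----------
def padHi (h : List Int) : Nat → Int := fun t => (0 :: h ++ [0]).getD t 0

theorem padHi_zero (h : List Int) : padHi h 0 = 0 := rfl

theorem padHi_succ (h : List Int) (j : Nat) : padHi h (j + 1) = h.getD j 0 := by
  show (h ++ [0]).getD j 0 = h.getD j 0
  by_cases hj : j < h.length
  · rw [List.getD_eq_getElem _ _ (by simp; omega), List.getElem_append_left hj,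
      List.getD_eq_getElem _ _ hj]
  · by_cases hj2 : j = h.length
    · subst hj2
      rw [List.getD_eq_getElem _ _ (by simp), List.getElem_append_right (le_refl _),
        List.getD_eq_default _ _ (le_refl _)]
      simp
    · rw [List.getD_eq_default _ _ (by simp; omega), List.getD_eq_default _ _ (by omega)]

theorem padHi_nonneg (h : List Int) (hn : ∀ x ∈ h, 0 ≤ x) (t : Nat) : 0 ≤ padHi h t := by
  rcases t with _ | j
  · simp [padHi_zero]
  · rw [padHi_succ]
    by_cases hj : j < h.length
    · rw [List.getD_eq_getElem _ _ hj]; exact hn _ (List.getElem_mem hj)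
    · rw [List.getD_eq_default _ _ (by omega)]

theorem padHi_top (h : List Int) (t : Nat) (ht : h.length + 1 ≤ t) : padHi h t = 0 := by
  rcases t with _ | j
  · rfl
  · rw [padHi_succ, List.getD_eq_default]
    omega

-- ---------- B side: bestUpTo enumerates exactly the interval areas ----------
def rowAreas (g : Nat → Int) (n : Nat) : List Int :=
  (List.range n).flatMap (fun j => (List.range (n - j)).map (fun t : Nat => ((t : Int) + 1) * segMin g j t))

theorem inner_run (h : List Int) (j : Nat) :
    ∀ (cnt d : Nat) (b : Int),
    (List.range' (j + d + 1) cnt).foldl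
      (fun (s : Int × Int) k =>
        let m := min s.2 (h.getD k 0)
        (max s.1 (((k : Int) - (j : Int) + 1) * m), m))
      (b, segMin (fun t => h.getD t 0) j d)
    = (((List.range cnt).map
          (fun t : Nat => ((d : Int) + 2 + t) * segMin (fun t' => h.getD t' 0) j (d + 1 + t))).foldl max b,
       segMin (fun t => h.getD t 0) j (d + cnt)) := by
  intro cnt
  induction cnt with
  | zero => intro d b; simp
  | succ cnt ih =>
    intro d b
    rw [List.range'_succ, List.foldl_cons]
    have hm : min (segMin (fun t => h.getD t 0) j d) (h.getD (j + d + 1) 0)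
        = segMin (fun t => h.getD t 0) j (d + 1) := (segMin_succ _ _ _).symm
    simp only []
    rw [hm]
    have harith : (((j : Int) + d + 1) - j + 1) = (d : Int) + 2 := by ring
    have := ih (d + 1) (max b ((((j + d + 1 : Nat) : Int) - (j : Int) + 1) * segMin (fun t => h.getD t 0) j (d + 1)))
    rw [show ((j:Nat) + (d+1) + 1) = j + d + 1 + 1 from by omega] at this
    rw [this, Prod.mk.injEq]
    constructor
    · rw [List.range_succ_eq_map, List.map_cons, List.map_map, List.foldl_cons]
      congr 1
      · congr 1
        push_cast; ring
      · apply List.map_congr_left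
        intro t _
        simp only [Function.comp]
        congr 1
        · push_cast; ring
        · congr 1; omega
    · congr 1; omega

theorem inner_eq (h : List Int) (n j : Nat) (b : Int) :
    ((List.range' j (n - j)).foldl
      (fun (s : Int × Int) k =>
        let m := min s.2 (h.getD k 0)
        (max s.1 (((k : Int) - (j : Int) + 1) * m), m))
      (b, h.getD j 0)).1
    = ((List.range (n - j)).map
        (fun t : Nat => ((t : Int) + 1) * segMin (fun t' => h.getD t' 0) j t)).foldl max b := by
  rcases Nat.eq_zero_or_pos (n - j) with hz | hp
  · simp [hz]
  · obtain ⟨m, hm⟩ : ∃ m, n - j = m + 1 := ⟨n - j - 1, by omega⟩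
    rw [hm, List.range'_succ, List.foldl_cons]
    simp only []
    rw [min_self]
    have h0 : h.getD j 0 = segMin (fun t' => h.getD t' 0) j 0 := rfl
    have harea : (((j : Int)) - j + 1) * h.getD j 0 = 1 * segMin (fun t' => h.getD t' 0) j 0 := by
      rw [← h0]; ring
    rw [show (j + 1) = j + 0 + 1 from rfl, h0]
    rw [inner_run h j m 0]
    rw [List.range_succ_eq_map, List.map_cons, List.map_map]
    rw [List.foldl_cons]
    simp only []
    have einit : ((j : Int) - j + 1) * segMin (fun t' => h.getD t' 0) j 0
        = (((0 : Nat) : Int) + 1) * segMin (fun t' => h.getD t' 0) j 0 := by push_cast; ring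
    have elist : List.map (fun t : Nat => (((0 : Nat) : Int) + 2 + t) * segMin (fun t' => h.getD t' 0) j (0 + 1 + t)) (List.range m)
        = List.map ((fun t : Nat => ((t : Int) + 1) * segMin (fun t' => h.getD t' 0) j t) ∘ Nat.succ) (List.range m) := by
      apply List.map_congr_left
      intro t _
      simp only [Function.comp]
      congr 1
      · push_cast; ring
      · congr 1; omega
    rw [einit, elist]

theorem foldl_flatMap_max (areas : Nat → List Int) (js : List Nat) :
    ∀ b : Int, js.foldl (fun b j => (areas j).foldl max b) b = (js.flatMap areas).foldl max b := by
  induction js with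
  | nil => intro b; rfl
  | cons j t ih => intro b; rw [List.foldl_cons, ih, List.flatMap_cons, List.foldl_append]

theorem bestUpTo_eq_foldl (h : List Int) (n : Nat) (b : Int) :
    bestUpTo h n b = (rowAreas (fun j => h.getD j 0) n).foldl max b := by
  unfold bestUpTo rowAreas
  rw [← foldl_flatMap_max]
  apply PySem.List.foldl_congr_mem
  intro acc j _
  exact inner_eq h n j acc

theorem segMin_shift (f : Nat → Int) (a : Nat) : ∀ k, segMin f (a + 1) k = segMin (fun u => f (u + 1)) a k := by
  intro k
  induction k with
  | zero => rfl
  | succ k ih =>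
    show min (segMin f (a + 1) k) (f (a + 1 + k + 1)) = min (segMin (fun u => f (u + 1)) a k) (f (a + k + 1 + 1))
    rw [ih, show a + 1 + k + 1 = a + k + 1 + 1 from by omega]

theorem segMin_pad (h : List Int) (j t : Nat) :
    segMin (padHi h) (j + 1) t = segMin (fun u => h.getD u 0) j t := by
  rw [segMin_shift]
  exact segMin_congr _ _ _ _ (fun u _ _ => padHi_succ h u)

theorem bestUpTo_UB (h : List Int) (n : Nat) :
    UBp (padHi h) n (bestUpTo h n 0) := by
  rw [bestUpTo_eq_foldl]
  constructor
  · exact foldl_max_init_le _ 0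
  · intro a k ha hk
    obtain ⟨j, rfl⟩ : ∃ j, a = j + 1 := ⟨a - 1, by omega⟩
    rw [segMin_pad]
    apply foldl_max_mem_le
    apply List.mem_flatMap.2
    refine ⟨j, List.mem_range.2 (by omega), List.mem_map.2 ⟨k, List.mem_range.2 (by omega), rfl⟩⟩

theorem bestUpTo_le (h : List Int) (n : Nat) (x : Int)
    (hx : UBp (padHi h) n x) : bestUpTo h n 0 ≤ x := by
  rw [bestUpTo_eq_foldl]
  apply foldl_max_le _ _ _ hx.1
  intro y hy
  obtain ⟨j, hj, hmem⟩ := List.mem_flatMap.1 hy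
  obtain ⟨t, ht, rfl⟩ := List.mem_map.1 hmem
  rw [← segMin_pad]
  exact hx.2 (j + 1) t (by omega)
    (by have h1 := List.mem_range.1 hj; have h2 := List.mem_range.1 ht; omega)

theorem bestUpTo_hoist (h : List Int) (n : Nat) (b : Int) (hb : 0 ≤ b) :
    bestUpTo h n b = max b (bestUpTo h n 0) := by
  rw [bestUpTo_eq_foldl, bestUpTo_eq_foldl]
  exact foldl_max_hoist _ b hb

-- ---------- A side: the monotonic-stack run ----------
def HChain (Hi : Nat → Int) : List Nat → Prop
  | [] => True
  | [t] => t = 0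
  | a :: b :: rest => b < a ∧ Hi b ≤ Hi a ∧ (∀ j, b < j → j < a → Hi a < Hi j) ∧ HChain Hi (b :: rest)

def stepF (H : List Int) (s : Int × List Nat) (i : Nat) : Int × List Nat :=
  ((lraPops H i s.1 s.2).1, i :: (lraPops H i s.1 s.2).2)

def StInv (Hi : Nat → Int) (n : Nat) (i : Nat) (s : Int × List Nat) : Prop :=
  (∃ rest, s.2 = (i - 1) :: rest) ∧ HChain Hi s.2 ∧ (∀ t ∈ s.2, t < i) ∧ 0 ≤ s.1 ∧
  (∀ x, UBp Hi n x → s.1 ≤ x) ∧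
  (∀ a k, 1 ≤ a → a + k + 1 ≤ i → 0 < segMin Hi a k →
    (∀ r, a + k < r → r < i → segMin Hi a k ≤ Hi r) →
    ∃ t ∈ s.2, a ≤ t ∧ t ≤ a + k ∧ Hi t = segMin Hi a k) ∧
  (∀ a k, 1 ≤ a → a + k + 1 ≤ i → 0 < segMin Hi a k →
    (∃ r, a + k < r ∧ r < i ∧ Hi r < segMin Hi a k) →
    ((k : Int) + 1) * segMin Hi a k ≤ s.1)

-- basic facts about the pop loop
theorem lraPops_stack (H : List Int) (i : Nat) :
    ∀ (st : List Nat) (ma : Int),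
    (lraPops H i ma st).2 = st.dropWhile (fun t => decide (H.getD i 0 < H.getD t 0)) := by
  intro st
  induction st with
  | nil => intro ma; rfl
  | cons top rest ih =>
    intro ma
    by_cases hc : H.getD top 0 > H.getD i 0
    · simp only [lraPops, if_pos hc, ih]
      rw [List.dropWhile_cons, if_pos (by exact decide_eq_true hc)]
    · simp only [lraPops, if_neg hc]
      rw [List.dropWhile_cons, if_neg (by simpa using hc)]

theorem lraPops_mono (H : List Int) (i : Nat) :
    ∀ (st : List Nat) (ma : Int), ma ≤ (lraPops H i ma st).1 := by
  intro st
  induction st with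
  | nil => intro ma; exact le_refl ma
  | cons top rest ih =>
    intro ma
    by_cases hc : H.getD top 0 > H.getD i 0
    · simp only [lraPops, if_pos hc]
      exact le_trans (le_max_left _ _) (ih _)
    · simp only [lraPops, if_neg hc]
      exact le_refl ma

-- chain facts
theorem hchain_cons (Hi : Nat → Int) (a : Nat) (rest : List Nat)
    (h : HChain Hi (a :: rest)) : HChain Hi rest := by
  cases rest with
  | nil => trivial
  | cons b r => exact h.2.2.2

theorem hchain_dropWhile (Hi : Nat → Int) (p : Nat → Bool) :
    ∀ st, HChain Hi st → HChain Hi (st.dropWhile p) := by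
  intro st
  induction st with
  | nil => intro _; trivial
  | cons a l ih =>
    intro h
    rw [List.dropWhile_cons]
    by_cases hp : p a = true
    · simp only [hp, if_true]
      exact ih (hchain_cons Hi a l h)
    · rw [if_neg (by simp [hp])]
      exact h

theorem hchain_head_lt (Hi : Nat → Int) :
    ∀ rest a, HChain Hi (a :: rest) → ∀ u ∈ rest, u < a := by
  intro rest
  induction rest with
  | nil => intro a _ u hu; cases hu
  | cons b r ih =>
    intro a h u hu
    rcases List.mem_cons.1 hu with rfl | hu'
    · exact h.1
    · exact lt_trans (ih b h.2.2.2 u hu') h.1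

theorem hchain_head_ge (Hi : Nat → Int) :
    ∀ rest a, HChain Hi (a :: rest) → ∀ u ∈ rest, Hi u ≤ Hi a := by
  intro rest
  induction rest with
  | nil => intro a _ u hu; cases hu
  | cons b r ih =>
    intro a h u hu
    rcases List.mem_cons.1 hu with rfl | hu'
    · exact h.2.1
    · exact le_trans (ih b h.2.2.2 u hu') h.2.1

theorem hchain_zero_mem (Hi : Nat → Int) :
    ∀ st, HChain Hi st → st ≠ [] → 0 ∈ st := by
  intro st
  induction st with
  | nil => intro _ hne; exact absurd rfl hne
  | cons a l ih =>
    intro h _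
    cases l with
    | nil => rw [h]; exact List.mem_singleton.2 rfl
    | cons b r => exact List.mem_cons_of_mem a (ih h.2.2.2 (by simp))

theorem hchain_suffix (Hi : Nat → Int) :
    ∀ pre st, HChain Hi (pre ++ st) → HChain Hi st := by
  intro pre
  induction pre with
  | nil => intro st h; exact h
  | cons a p ih => intro st h; exact ih st (hchain_cons Hi a (p ++ st) h)

theorem hchain_ge_of_above (Hi : Nat → Int) :
    ∀ pre t post, HChain Hi (pre ++ t :: post) → ∀ u ∈ pre, Hi t ≤ Hi u := by
  intro pre
  induction pre with
  | nil => intro t post _ u hu; cases hu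
  | cons a p ih =>
    intro t post h u hu
    rcases List.mem_cons.1 hu with rfl | hu'
    · exact hchain_head_ge Hi (p ++ t :: post) u h t (by simp)
    · exact ih t post (hchain_cons Hi a _ h) u hu'

theorem hchain_cross (Hi : Nat → Int) :
    ∀ st p j, HChain Hi st → p ∈ st → p < j → j ≤ st.headD 0 →
      ∃ u ∈ st, p < u ∧ Hi u ≤ Hi j := by
  intro st
  induction st with
  | nil => intro p j _ hp; cases hp
  | cons a rest ih =>
    intro p j hch hp hpj hj
    simp only [List.headD_cons] at hj
    rcases List.mem_cons.1 hp with rfl | hp'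
    · omega
    · cases rest with
      | nil => cases hp'
      | cons b r =>
        by_cases hjb : j ≤ b
        · obtain ⟨u, hu, h1, h2⟩ := ih p j hch.2.2.2 hp' hpj (by simpa using hjb)
          exact ⟨u, List.mem_cons_of_mem a hu, h1, h2⟩
        · refine ⟨a, List.mem_cons_self .., ?_, ?_⟩
          · have := hchain_head_lt Hi (b :: r) a hch p hp'
            omega
          · rcases Nat.lt_or_ge j a with hja | hja
            · exact le_of_lt (hch.2.2.1 j (by omega) hja)
            · have : j = a := by omega
              rw [this]

theorem hchain_lowest (Hi : Nat → Int) :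
    ∀ st t a, HChain Hi st → t ∈ st → a ≤ t → 1 ≤ a →
    ∃ pre t' post, st = pre ++ t' :: post ∧ a ≤ t' ∧ t' ≤ t ∧ Hi t' = Hi t ∧
      (post.headD 0 < a ∨ Hi (post.headD 0) < Hi t) := by
  intro st
  induction st with
  | nil => intro t a _ ht; cases ht
  | cons x rest ih =>
    intro t a hch ht ha h1a
    rcases List.mem_cons.1 ht with rfl | ht'
    · cases rest with
      | nil =>
        exact ⟨[], t, [], rfl, ha, le_refl t, rfl, Or.inl (by simpa using h1a)⟩
      | cons p r =>
        by_cases hgood : p < a ∨ Hi p < Hi t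
        · exact ⟨[], t, p :: r, rfl, ha, le_refl t, rfl, by simpa using hgood⟩
        · rw [not_or, not_lt, not_lt] at hgood
          have hpm : Hi p = Hi t := le_antisymm hch.2.1 hgood.2
          obtain ⟨pre, t', post, heq, h1, h2, h3, h4⟩ :=
            ih p a hch.2.2.2 (List.mem_cons_self ..) hgood.1 h1a
          refine ⟨t :: pre, t', post, by rw [heq, List.cons_append], h1, le_trans h2 (le_of_lt hch.1), ?_, ?_⟩
          · rw [h3, hpm]
          · rw [hpm] at h4; exact h4
    · obtain ⟨pre, t', post, heq, h1, h2, h3, h4⟩ := ih t a (hchain_cons Hi x rest hch) ht' ha h1a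
      exact ⟨x :: pre, t', post, by rw [heq, List.cons_append], h1, h2, h3, h4⟩

-- dropWhile facts
theorem mem_dropWhile_of_false (p : Nat → Bool) :
    ∀ (l : List Nat) (x : Nat), x ∈ l → p x = false → x ∈ l.dropWhile p := by
  intro l
  induction l with
  | nil => intro x hx; cases hx
  | cons a t ih =>
    intro x hx hpx
    rw [List.dropWhile_cons]
    by_cases hpa : p a = true
    · simp only [hpa, if_true]
      rcases List.mem_cons.1 hx with rfl | hx'
      · rw [hpa] at hpx; cases hpx
      · exact ih x hx' hpx
    · rw [if_neg (by simp [hpa])]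
      exact hx

theorem dropWhile_head_false (p : Nat → Bool) :
    ∀ (l : List Nat) (x : Nat) (r : List Nat), l.dropWhile p = x :: r → p x = false := by
  intro l
  induction l with
  | nil => intro x r h; cases h
  | cons a t ih =>
    intro x r h
    rw [List.dropWhile_cons] at h
    by_cases hpa : p a = true
    · simp only [hpa, if_true] at h
      exact ih x r h
    · rw [if_neg (by simp [hpa])] at h
      cases h
      exact eq_false_of_ne_true hpa

-- the pop loop reaches a designated element and records its rectangle
theorem lraPops_reach (H : List Int) (i : Nat) :
    ∀ pre (t : Nat) post (ma : Int),
      (∀ u ∈ pre, H.getD i 0 < H.getD u 0) → H.getD i 0 < H.getD t 0 →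
      ((i : Int) - ((post.headD 0 : Nat) : Int) - 1) * H.getD t 0 ≤
        (lraPops H i ma (pre ++ t :: post)).1 := by
  intro pre
  induction pre with
  | nil =>
    intro t post ma _ hcond
    simp only [List.nil_append, lraPops, if_pos (show H.getD t 0 > H.getD i 0 from hcond)]
    exact le_trans (le_max_right _ _) (lraPops_mono H i post _)
  | cons u pre' ih =>
    intro t post ma hpre hcond
    have hu : H.getD i 0 < H.getD u 0 := hpre u (List.mem_cons_self ..)
    simp only [List.cons_append, lraPops, if_pos (show H.getD u 0 > H.getD i 0 from hu)]
    exact ih t post _ (fun v hv => hpre v (List.mem_cons_of_mem u hv)) hcond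

-- every value the pop loop records is bounded by any interval-area upper bound
theorem lraPops_le (H : List Int) (n i : Nat) (x : Int) (hin : i ≤ n + 1)
    (hz : H.getD 0 0 ≤ H.getD i 0) :
    ∀ st (ma : Int), HChain (fun t => H.getD t 0) st → (∀ t ∈ st, t < i) →
    (∀ j, st.headD 0 < j → j < i → H.getD (st.headD 0) 0 ≤ H.getD j 0) →
    ma ≤ x → UBp (fun t => H.getD t 0) n x → (lraPops H i ma st).1 ≤ x := by
  intro st
  induction st with
  | nil => intro ma _ _ _ hma _; exact hma
  | cons top rest ih =>
    intro ma hch hlt hgap hma hub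
    by_cases hc : H.getD top 0 > H.getD i 0
    · simp only [lraPops, if_pos hc]
      have htopi : top < i := hlt top (List.mem_cons_self ..)
      have htop0 : top ≠ 0 := by
        intro h0; rw [h0] at hc; exact absurd hz (not_le.2 hc)
      -- rest is nonempty (the bottom sentinel 0 is never popped)
      obtain ⟨p, r, rfl⟩ : ∃ p r, rest = p :: r := by
        cases rest with
        | nil => exact absurd hch htop0
        | cons p r => exact ⟨p, r, rfl⟩
      have hp_top : p < top := hch.1
      have harea : ((i : Int) - (p : Int) - 1) * H.getD top 0 ≤ x := by
        rcases lt_or_ge (0 : Int) (H.getD top 0) with hpos | hle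
        case inr =>
          have hw : (0 : Int) ≤ (i : Int) - (p : Int) - 1 := by
            have : p < i := lt_trans hp_top htopi
            omega
          exact le_trans (mul_nonpos_of_nonneg_of_nonpos hw hle) hub.1
        case inl =>
          -- the popped bar is the minimum of columns [p+1, i-1]
          have hpi : p + 2 ≤ i := by omega
          have hmin : segMin (fun t => H.getD t 0) (p + 1) (i - p - 2) = H.getD top 0 := by
            apply le_antisymm
            · exact segMin_le _ _ _ top (by omega) (by omega)
            · apply le_segMin
              intro j hj1 hj2
              rcases Nat.lt_or_ge j top with hjt | hjt
              · exact le_of_lt (hch.2.2.1 j (by omega) hjt)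
              · rcases Nat.eq_or_lt_of_le hjt with rfl | hjt'
                · exact le_refl _
                · exact hgap j (by simpa using hjt') (by omega)
          have := hub.2 (p + 1) (i - p - 2) (by omega) (by omega)
          rw [hmin] at this
          calc ((i : Int) - (p : Int) - 1) * H.getD top 0
              = (((i - p - 2 : Nat) : Int) + 1) * H.getD top 0 := by
                congr 1; omega
            _ ≤ x := this
      apply ih _ (hchain_cons _ top _ hch) (fun t ht => hlt t (List.mem_cons_of_mem top ht)) ?_
        (max_le hma harea) hub
      -- new gap property for head p
      intro j hj1 hj2
      simp only [List.headD_cons] at hj1 ⊢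
      have hptop : H.getD p 0 ≤ H.getD top 0 := hch.2.1
      rcases Nat.lt_or_ge j top with hjt | hjt
      · exact le_trans hptop (le_of_lt (hch.2.2.1 j hj1 hjt))
      · rcases Nat.eq_or_lt_of_le hjt with rfl | hjt'
        · exact hptop
        · exact le_trans hptop (hgap j (by simpa using hjt') hj2)
    · simp only [lraPops, if_neg hc]
      exact hma

theorem stack_run (H : List Int) (n : Nat)
    (hnn : ∀ t, 0 ≤ H.getD t 0) (h0 : H.getD 0 0 = 0) :
    ∀ i, 1 ≤ i → i ≤ n + 2 →
      StInv (fun t => H.getD t 0) n i ((List.range i).foldl (stepF H) (0, ([] : List Nat))) := by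
  intro i
  induction i with
  | zero => intro hcon; omega
  | succ i ih =>
    intro _ hle
    rcases Nat.eq_zero_or_pos i with rfl | hi1
    · have hbase : (List.range 1).foldl (stepF H) (0, ([] : List Nat)) = (0, [0]) := rfl
      rw [hbase]
      refine ⟨⟨[], rfl⟩, rfl, ?_, le_refl 0, fun x hx => hx.1, ?_, ?_⟩
      · intro t ht
        have : t = 0 := List.mem_singleton.1 ht
        omega
      · intro a k ha hk _ _; exact absurd hk (by omega)
      · intro a k ha hk _ _; exact absurd hk (by omega)
    · have hIH := ih hi1 (by omega)
      rw [List.range_succ, List.foldl_append, List.foldl_cons, List.foldl_nil]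
      obtain ⟨⟨rest0, hst⟩, hch, hlt, hma0, hub, hd1, hd2⟩ := hIH
      set S := (List.range i).foldl (stepF H) (0, ([] : List Nat)) with hS
      have hz : H.getD 0 0 ≤ H.getD i 0 := by rw [h0]; exact hnn i
      have hstep2 : (stepF H S i).2
          = i :: S.2.dropWhile (fun t => decide (H.getD i 0 < H.getD t 0)) := by
        simp only [stepF, lraPops_stack]
      have hstep1 : (stepF H S i).1 = (lraPops H i S.1 S.2).1 := rfl
      have hSne : S.2 ≠ [] := by rw [hst]; simp
      have h0mem : (0 : Nat) ∈ S.2 := hchain_zero_mem _ S.2 hch hSne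
      have h0surv : (0 : Nat) ∈ S.2.dropWhile (fun t => decide (H.getD i 0 < H.getD t 0)) :=
        mem_dropWhile_of_false _ S.2 0 h0mem (decide_eq_false (not_lt.2 hz))
      obtain ⟨p, post, hdrop⟩ :
          ∃ p post, S.2.dropWhile (fun t => decide (H.getD i 0 < H.getD t 0)) = p :: post := by
        cases hdw : S.2.dropWhile (fun t => decide (H.getD i 0 < H.getD t 0)) with
        | nil => rw [hdw] at h0surv; cases h0surv
        | cons p post => exact ⟨p, post, rfl⟩
      have hsurv_sub : ∀ t ∈ S.2.dropWhile (fun t => decide (H.getD i 0 < H.getD t 0)), t ∈ S.2 :=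
        fun t ht => (List.dropWhile_sublist _).subset ht
      have hchain' : HChain (fun t => H.getD t 0)
          (S.2.dropWhile (fun t => decide (H.getD i 0 < H.getD t 0))) :=
        hchain_dropWhile _ _ S.2 hch
      have hsplit : S.2 = S.2.takeWhile (fun t => decide (H.getD i 0 < H.getD t 0)) ++
          S.2.dropWhile (fun t => decide (H.getD i 0 < H.getD t 0)) :=
        (List.takeWhile_append_dropWhile).symm
      -- the new-gap property: every column strictly between p and i is strictly higher than column i
      have hgapnew : ∀ j, p < j → j < i → H.getD i 0 < H.getD j 0 := by
        intro j hj1 hj2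
        have hpmem : p ∈ S.2 := hsurv_sub p (by rw [hdrop]; exact List.mem_cons_self ..)
        have hjhead : j ≤ S.2.headD 0 := by rw [hst]; simp only [List.headD_cons]; omega
        obtain ⟨u, huS, hpu, huj⟩ := hchain_cross _ S.2 p j hch hpmem hj1 hjhead
        rcases List.mem_append.1 (hsplit ▸ huS) with hu1 | hu2
        · have := List.mem_takeWhile_imp hu1
          have : H.getD i 0 < H.getD u 0 := of_decide_eq_true this
          omega
        · exfalso
          rw [hdrop] at hu2
          rcases List.mem_cons.1 hu2 with rfl | hu3
          · omega
          · have := hchain_head_lt _ post p (hdrop ▸ hchain') u hu3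
            omega
      refine ⟨⟨p :: post, by rw [hstep2, hdrop, Nat.add_sub_cancel]⟩, ?_, ?_, ?_, ?_, ?_, ?_⟩
      · -- chain
        rw [hstep2, hdrop]
        refine ⟨?_, ?_, ?_, hdrop ▸ hchain'⟩
        · exact hlt p (hsurv_sub p (by rw [hdrop]; exact List.mem_cons_self ..))
        · have := dropWhile_head_false _ S.2 p post hdrop
          exact not_lt.1 (of_decide_eq_false this)
        · exact hgapnew
      · -- all elements < i+1
        intro t ht
        rw [hstep2] at ht
        rcases List.mem_cons.1 ht with rfl | ht'
        · omega
        · exact lt_trans (hlt t (hsurv_sub t ht')) (by omega)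
      · -- 0 ≤ ma'
        rw [hstep1]
        exact le_trans hma0 (lraPops_mono H i S.2 S.1)
      · -- upper bound preserved
        intro x hx
        rw [hstep1]
        apply lraPops_le H n i x (by omega) hz S.2 S.1 hch hlt ?_ (hub x hx) hx
        intro j hj1 hj2
        rw [hst] at hj1
        simp only [List.headD_cons] at hj1
        omega
      · -- d1
        intro a k ha hk hm hopen
        by_cases hcase : a + k + 1 ≤ i
        · obtain ⟨t, htmem, hta, htk, htm⟩ :=
            hd1 a k ha hcase hm (fun r h1 h2 => hopen r h1 (by omega))
          simp only [] at htm
          have hti : H.getD t 0 ≤ H.getD i 0 := by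
            rw [htm]; exact hopen i (by omega) (by omega)
          refine ⟨t, ?_, hta, htk, htm⟩
          rw [hstep2]
          exact List.mem_cons_of_mem i
            (mem_dropWhile_of_false _ S.2 t htmem (decide_eq_false (not_lt.2 hti)))
        · have hak : a + k = i := by omega
          have hile : segMin (fun t => H.getD t 0) a k ≤ H.getD i 0 :=
            segMin_le _ a k i (by omega) (by omega)
          by_cases heq : H.getD i 0 = segMin (fun t => H.getD t 0) a k
          · exact ⟨i, by rw [hstep2]; exact List.mem_cons_self .., by omega, by omega, heq⟩
          · have hlt2 : segMin (fun t => H.getD t 0) a k < H.getD i 0 :=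
              lt_of_le_of_ne hile (fun hcon => heq hcon.symm)
            obtain ⟨k', rfl⟩ : ∃ k', k = k' + 1 := by
              cases k with
              | zero =>
                exfalso
                have : a = i := by omega
                rw [this] at hlt2
                exact lt_irrefl _ hlt2
              | succ k' => exact ⟨k', rfl⟩
            have hsame : segMin (fun t => H.getD t 0) a (k' + 1)
                = segMin (fun t => H.getD t 0) a k' := by
              rcases min_choice (segMin (fun t => H.getD t 0) a k')
                  ((fun t => H.getD t 0) (a + k' + 1)) with hmc | hmc
              · rw [segMin_succ, hmc]
              · exfalso
                have : a + k' + 1 = i := by omega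
                rw [segMin_succ, hmc, this] at heq hlt2
                exact lt_irrefl _ hlt2
            obtain ⟨t, htmem, hta, htk, htm⟩ :=
              hd1 a k' ha (by omega) (by rw [← hsame]; exact hm)
                (fun r h1 h2 => absurd h2 (by omega))
            simp only [] at htm
            have hti : H.getD t 0 ≤ H.getD i 0 := by
              rw [htm, ← hsame]; exact le_of_lt hlt2
            refine ⟨t, ?_, hta, by omega, by simp only []; rw [htm, hsame]⟩
            rw [hstep2]
            exact List.mem_cons_of_mem i
              (mem_dropWhile_of_false _ S.2 t htmem (decide_eq_false (not_lt.2 hti)))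
      · -- d2
        intro a k ha hk hm hex
        obtain ⟨r, hr1, hr2, hrlt⟩ := hex
        simp only [] at hrlt
        rw [hstep1]
        rcases Nat.lt_or_ge r i with hri | hri
        · have := hd2 a k ha (by omega) hm ⟨r, hr1, hri, hrlt⟩
          exact le_trans this (lraPops_mono H i S.2 S.1)
        · have hreq : r = i := by omega
          subst hreq
          by_cases hcl : ∃ r', a + k < r' ∧ r' < r ∧ H.getD r' 0 < segMin (fun t => H.getD t 0) a k
          · obtain ⟨r', h1, h2, h3⟩ := hcl
            have := hd2 a k ha (by omega) hm ⟨r', h1, h2, h3⟩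
            exact le_trans this (lraPops_mono H r S.2 S.1)
          · have hopen : ∀ r', a + k < r' → r' < r → segMin (fun t => H.getD t 0) a k ≤ H.getD r' 0 := by
              intro r' h1 h2
              by_contra hno
              exact hcl ⟨r', h1, h2, not_le.1 hno⟩
            obtain ⟨t, htmem, hta, htk, htm⟩ := hd1 a k ha (by omega) hm hopen
            simp only [] at htm
            obtain ⟨pre, t', post', hdec, h1', h2', h3', h4'⟩ :=
              hchain_lowest _ S.2 t a hch htmem hta ha
            have hm' : H.getD t' 0 = segMin (fun t => H.getD t 0) a k := by rw [h3', htm]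
            have hit' : H.getD r 0 < H.getD t' 0 := by rw [hm']; exact hrlt
            have hpa : post'.headD 0 < a := by
              rcases h4' with hgood | hbad
              · exact hgood
              · by_contra hge
                have hge' : a ≤ post'.headD 0 := not_lt.1 hge
                have hplt : post'.headD 0 < t' := by
                  cases post' with
                  | nil => simp at hge'; omega
                  | cons q qs =>
                    have := hchain_suffix _ pre (t' :: q :: qs) (by rw [← hdec]; exact hch)
                    exact this.1
                have hseg := segMin_le (fun t => H.getD t 0) a k (post'.headD 0)
                  hge' (by omega)
                simp only [] at hseg
                rw [← htm] at hseg
                omega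
            have hprea : ∀ u ∈ pre, H.getD r 0 < H.getD u 0 := by
              intro u hu
              have := hchain_ge_of_above _ pre t' post' (by rw [← hdec]; exact hch) u hu
              simp only [] at this
              omega
            have hreach := lraPops_reach H r pre t' post' S.1 hprea hit'
            rw [← hdec] at hreach
            refine le_trans ?_ hreach
            rw [hm']
            apply mul_le_mul_of_nonneg_right _ (le_of_lt hm)
            have : post'.headD 0 + 1 ≤ a := hpa
            omega

theorem lra_spec (h : List Int) (hn : ∀ x ∈ h, 0 ≤ x) :
    (largestRectangleAreaStack h = bestUpTo h h.length 0) := by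
  rcases Nat.eq_zero_or_pos h.length with hz | hpos
  · obtain rfl := List.eq_nil_of_length_eq_zero hz
    rfl
  · have hguard : ¬ (h.length < 1) := by omega
    have hnn : ∀ t, 0 ≤ (0 :: h ++ [0]).getD t 0 := fun t => padHi_nonneg h hn t
    have hrun := stack_run (0 :: h ++ [0]) h.length hnn rfl (h.length + 2) (by omega) (le_refl _)
    obtain ⟨_, _, _, hma0, hub, _, hd2⟩ := hrun
    have hval : largestRectangleAreaStack h
        = ((List.range (h.length + 2)).foldl (stepF (0 :: h ++ [0])) (0, ([] : List Nat))).1 := by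
      unfold largestRectangleAreaStack
      rw [if_neg hguard]
      show ((List.range ((0 :: h ++ [0]).length)).foldl
        (fun (s : Int × List Nat) i => let t := lraPops (0 :: h ++ [0]) i s.1 s.2; (t.1, i :: t.2))
        (0, ([] : List Nat))).1
        = ((List.range (h.length + 2)).foldl (stepF (0 :: h ++ [0])) (0, ([] : List Nat))).1
      have hlen2 : (0 :: h ++ [0]).length = h.length + 2 := by simp
      rw [hlen2]
      rfl
    rw [hval]
    apply le_antisymm
    · exact hub (bestUpTo h h.length 0) (bestUpTo_UB h h.length)
    · apply bestUpTo_le h h.length _ ?_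
      constructor
      · exact hma0
      · intro a k ha hk
        rcases lt_or_ge 0 (segMin (padHi h) a k) with hpos2 | hle
        · refine hd2 a k ha (by omega) hpos2 ⟨h.length + 1, by omega, by omega, ?_⟩
          have hz2 : (0 :: h ++ [0]).getD (h.length + 1) 0 = 0 :=
            padHi_top h (h.length + 1) (le_refl _)
          show (0 :: h ++ [0]).getD (h.length + 1) 0
            < segMin (fun t => (0 :: h ++ [0]).getD t 0) a k
          rw [hz2]
          exact hpos2
        · exact le_trans (mul_nonpos_of_nonneg_of_nonpos (by positivity) hle) hma0

-- ---------- plumbing ----------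

-- min over the flattened list = min over per-row mins (rows nonempty)
theorem min_flat_eq (arr : List (List Int)) (h1 : arr ≠ []) (h2 : ∀ r ∈ arr, r ≠ []) :
    (PySem.List.min? (arr.flatMap (fun r => r)) (fun x => x)).getD 0 =
    (PySem.List.min? (arr.map (fun r => (PySem.List.min? r (fun x => x)).getD 0)) (fun x => x)).getD 0 := by
  have hFne : arr.flatMap (fun r => r) ≠ [] := by
    obtain ⟨r0, rest, rfl⟩ : ∃ r0 rest, arr = r0 :: rest := by
      cases arr with
      | nil => exact absurd rfl h1
      | cons a b => exact ⟨a, b, rfl⟩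
    intro hcon
    rw [List.flatMap_cons] at hcon
    exact h2 r0 (List.mem_cons_self ..) (List.append_eq_nil_iff.1 hcon).1
  obtain ⟨mF, hmF⟩ : ∃ mF, PySem.List.min? (arr.flatMap (fun r => r)) (fun x => x) = some mF := by
    cases hm : PySem.List.min? (arr.flatMap (fun r => r)) (fun x => x) with
    | none => exact absurd ((PySem.List.min?_eq_none_iff _ _).1 hm) hFne
    | some m => exact ⟨m, rfl⟩
  obtain ⟨mM, hmM⟩ : ∃ mM, PySem.List.min?
      (arr.map (fun r => (PySem.List.min? r (fun x => x)).getD 0)) (fun x => x) = some mM := by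
    cases hm : PySem.List.min? (arr.map (fun r => (PySem.List.min? r (fun x => x)).getD 0)) (fun x => x) with
    | none =>
      have := (PySem.List.min?_eq_none_iff _ _).1 hm
      rw [List.map_eq_nil_iff] at this
      exact absurd this h1
    | some m => exact ⟨m, rfl⟩
  rw [hmF, hmM, Option.getD_some, Option.getD_some]
  have hrowmin : ∀ r ∈ arr, ∃ mr, PySem.List.min? r (fun x => x) = some mr := by
    intro r hr
    cases hm : PySem.List.min? r (fun x => x) with
    | none => exact absurd ((PySem.List.min?_eq_none_iff _ _).1 hm) (h2 r hr)
    | some m => exact ⟨m, rfl⟩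
  apply le_antisymm
  · obtain ⟨r, hrarr, hval⟩ := List.mem_map.1 (PySem.List.min?_mem hmM)
    obtain ⟨mr, hmr⟩ := hrowmin r hrarr
    rw [hmr, Option.getD_some] at hval
    rw [← hval]
    exact PySem.List.min?_isMin hmF mr (List.mem_flatMap.2 ⟨r, hrarr, PySem.List.min?_mem hmr⟩)
  · obtain ⟨r, hrarr, hmemr⟩ := List.mem_flatMap.1 (PySem.List.min?_mem hmF)
    obtain ⟨mr, hmr⟩ := hrowmin r hrarr
    have ha : mr ≤ mF := PySem.List.min?_isMin hmr mF hmemr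
    have hb : mM ≤ (PySem.List.min? r (fun x => x)).getD 0 :=
      PySem.List.min?_isMin hmM _ (List.mem_map_of_mem hrarr)
    rw [hmr, Option.getD_some] at hb
    omega

theorem max_flat_eq (arr : List (List Int)) (h1 : arr ≠ []) (h2 : ∀ r ∈ arr, r ≠ []) :
    (PySem.List.max? (arr.flatMap (fun r => r)) (fun x => x)).getD 0 =
    (PySem.List.max? (arr.map (fun r => (PySem.List.max? r (fun x => x)).getD 0)) (fun x => x)).getD 0 := by
  have hFne : arr.flatMap (fun r => r) ≠ [] := by
    obtain ⟨r0, rest, rfl⟩ : ∃ r0 rest, arr = r0 :: rest := by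
      cases arr with
      | nil => exact absurd rfl h1
      | cons a b => exact ⟨a, b, rfl⟩
    intro hcon
    rw [List.flatMap_cons] at hcon
    exact h2 r0 (List.mem_cons_self ..) (List.append_eq_nil_iff.1 hcon).1
  obtain ⟨mF, hmF⟩ : ∃ mF, PySem.List.max? (arr.flatMap (fun r => r)) (fun x => x) = some mF := by
    cases hm : PySem.List.max? (arr.flatMap (fun r => r)) (fun x => x) with
    | none => exact absurd ((PySem.List.max?_eq_none_iff _ _).1 hm) hFne
    | some m => exact ⟨m, rfl⟩
  obtain ⟨mM, hmM⟩ : ∃ mM, PySem.List.max?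
      (arr.map (fun r => (PySem.List.max? r (fun x => x)).getD 0)) (fun x => x) = some mM := by
    cases hm : PySem.List.max? (arr.map (fun r => (PySem.List.max? r (fun x => x)).getD 0)) (fun x => x) with
    | none =>
      have := (PySem.List.max?_eq_none_iff _ _).1 hm
      rw [List.map_eq_nil_iff] at this
      exact absurd this h1
    | some m => exact ⟨m, rfl⟩
  rw [hmF, hmM, Option.getD_some, Option.getD_some]
  have hrowmax : ∀ r ∈ arr, ∃ mr, PySem.List.max? r (fun x => x) = some mr := by
    intro r hr
    cases hm : PySem.List.max? r (fun x => x) with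
    | none => exact absurd ((PySem.List.max?_eq_none_iff _ _).1 hm) (h2 r hr)
    | some m => exact ⟨m, rfl⟩
  apply le_antisymm
  · obtain ⟨r, hrarr, hmemr⟩ := List.mem_flatMap.1 (PySem.List.max?_mem hmF)
    obtain ⟨mr, hmr⟩ := hrowmax r hrarr
    have ha : mF ≤ mr := PySem.List.max?_isMax hmr mF hmemr
    have hb : (PySem.List.max? r (fun x => x)).getD 0 ≤ mM :=
      PySem.List.max?_isMax hmM _ (List.mem_map_of_mem hrarr)
    rw [hmr, Option.getD_some] at hb
    omega
  · obtain ⟨r, hrarr, hval⟩ := List.mem_map.1 (PySem.List.max?_mem hmM)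
    obtain ⟨mr, hmr⟩ := hrowmax r hrarr
    rw [hmr, Option.getD_some] at hval
    rw [← hval]
    exact PySem.List.max?_isMax hmF mr (List.mem_flatMap.2 ⟨r, hrarr, PySem.List.max?_mem hmr⟩)

-- generic fold preservation
theorem foldl_preserve {A B : Type} (P : A → Prop) (f : A → B → A) (l : List B) :
    ∀ (init : A), P init → (∀ a b, P a → P (f a b)) → P (l.foldl f init) := by
  induction l with
  | nil => intro init h0 _; exact h0
  | cons b t ih => intro init h0 hstep; exact ih (f init b) (hstep init b h0) hstep

-- rasterisation keeps the m × m shape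
theorem paintCell_shape (m : Nat) (mat : List (List Int)) (i j c : Int)
    (hlen : mat.length = m) (hrows : ∀ r ∈ mat, r.length = m) :
    (paintCell mat i j c).length = m ∧ ∀ r ∈ paintCell mat i j c, r.length = m := by
  constructor
  · rw [paintCell, PySem.List.length_pySetD]; exact hlen
  · intro r hr
    rw [paintCell] at hr
    unfold PySem.List.pySetD PySem.List.pySet? at hr
    cases hk : PySem.List.pyIdx? mat.length i with
    | none => rw [hk] at hr; simp at hr; exact hrows r hr
    | some k =>
      rw [hk] at hr
      simp only [Option.map_some, Option.getD_some] at hr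
      rcases List.mem_or_eq_of_mem_set hr with hin | rfl
      · exact hrows r hin
      · have hmem : PySem.List.pyGetD mat i [] ∈ mat := by
          apply PySem.List.pyGetD_mem
          by_contra hnr
          have hnone : PySem.List.pyIdx? mat.length i = none := by
            unfold PySem.List.pyIdx?
            unfold PySem.Raise.InRange at hnr
            split_ifs with hc1 hc2 hc3
            · exact absurd ⟨by omega, hc2⟩ hnr
            · rfl
            · exact absurd ⟨hc3, by omega⟩ hnr
            · rfl
          rw [hnone] at hk
          cases hk
        cases hk2 : PySem.List.pyIdx? (PySem.List.pyGetD mat i []).length j with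
        | none => simpa using hrows _ hmem
        | some k2 => simpa [List.length_set] using hrows _ hmem

theorem paintRect_shape (m : Nat) (mat : List (List Int)) (x0 y0 x1 y1 c : Int)
    (hlen : mat.length = m) (hrows : ∀ r ∈ mat, r.length = m) :
    (paintRect mat x0 y0 x1 y1 c).length = m ∧ ∀ r ∈ paintRect mat x0 y0 x1 y1 c, r.length = m := by
  rw [paintRect]
  apply foldl_preserve (fun mt => mt.length = m ∧ ∀ r ∈ mt, r.length = m) _ _ mat ⟨hlen, hrows⟩
  intro a b hQ
  apply foldl_preserve (fun mt => mt.length = m ∧ ∀ r ∈ mt, r.length = m) _ _ a hQ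
  intro a' b' hQ'
  exact paintCell_shape m a' b b' c hQ'.1 hQ'.2

theorem rasterize_shape (arr2 : List (List Int)) (m : Nat) :
    (rasterize arr2 m).1.length = m ∧ ∀ r ∈ (rasterize arr2 m).1, r.length = m := by
  rw [rasterize]
  have := foldl_preserve
    (fun (s : List (List Int) × List Int) => s.1.length = m ∧ ∀ r ∈ s.1, r.length = m)
    (fun s row =>
      match row with
      | [x0, y0, x1, y1, c] => (paintRect s.1 x0 y0 x1 y1 c, PySem.Set.add s.2 c)
      | _ => s)
    arr2
    (List.replicate m (List.replicate m 0), (PySem.Set.empty : PySem.Set Int))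
    ⟨by simp, by intro r hr; exact (List.eq_of_mem_replicate hr) ▸ (by simp)⟩
    ?_
  · exact this
  · intro a row hQ
    match row with
    | [x0, y0, x1, y1, c] => exact paintRect_shape m a.1 x0 y0 x1 y1 c hQ.1 hQ.2
    | [] => exact hQ
    | [_] => exact hQ
    | [_, _] => exact hQ
    | [_, _, _] => exact hQ
    | [_, _, _, _] => exact hQ
    | _ :: _ :: _ :: _ :: _ :: _ :: _ => exact hQ

theorem getD_nonneg (l : List Int) (hl : ∀ x ∈ l, 0 ≤ x) (j : Nat) : 0 ≤ l.getD j 0 := by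
  by_cases hj : j < l.length
  · rw [List.getD_eq_getElem _ _ hj]; exact hl _ (List.getElem_mem hj)
  · rw [List.getD_eq_default _ _ (by omega)]

theorem heights_nonneg (n : Nat) (c : Int) (row hs : List Int) (hhs : ∀ x ∈ hs, 0 ≤ x) :
    ∀ x ∈ (List.range n).map (fun j => if row.getD j 0 = c then hs.getD j 0 + 1 else 0), 0 ≤ x := by
  intro x hx
  obtain ⟨j, _, rfl⟩ := List.mem_map.1 hx
  split_ifs
  · have := getD_nonneg hs hhs j; omega
  · exact le_refl 0

-- per-color rows fold, A side hoist
theorem rowsA_hoist (n : Nat) (c : Int) (rows : List (List Int)) :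
    ∀ (hs : List Int) (a : Int), 0 ≤ a →
    (rows.foldl
      (fun (s : Int × List Int) row =>
        let h := (List.range n).map (fun j => if row.getD j 0 = c then s.2.getD j 0 + 1 else 0)
        (max s.1 (largestRectangleAreaStack h), h))
      (a, hs)).1
    = max a ((rows.foldl
      (fun (s : Int × List Int) row =>
        let h := (List.range n).map (fun j => if row.getD j 0 = c then s.2.getD j 0 + 1 else 0)
        (max s.1 (largestRectangleAreaStack h), h))
      (0, hs)).1) := by
  induction rows with
  | nil =>
    intro hs a ha
    simp only [List.foldl_nil]
    simp only [Int.max_def]; split_ifs <;> omega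
  | cons row rows ih =>
    intro hs a ha
    simp only [List.foldl_cons]
    rw [ih _ _ (le_trans ha (le_max_left a _)), ih _ _ (le_max_left 0 _)]
    simp only [Int.max_def]; split_ifs <;> omega

-- per-color rows fold: B's carried-best fold equals A's
theorem rowsB_eq (n : Nat) (c : Int) (rows : List (List Int)) :
    ∀ (hs : List Int) (b : Int), 0 ≤ b → (∀ x ∈ hs, 0 ≤ x) →
    (rows.foldl
      (fun (s : Int × List Int) row =>
        let h := (List.range n).map (fun j => if row.getD j 0 = c then s.2.getD j 0 + 1 else 0)
        (bestUpTo h n s.1, h))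
      (b, hs)).1
    = max b ((rows.foldl
      (fun (s : Int × List Int) row =>
        let h := (List.range n).map (fun j => if row.getD j 0 = c then s.2.getD j 0 + 1 else 0)
        (max s.1 (largestRectangleAreaStack h), h))
      (0, hs)).1) := by
  induction rows with
  | nil =>
    intro hs b hb _
    simp only [List.foldl_nil]
    simp only [Int.max_def]; split_ifs <;> omega
  | cons row rows ih =>
    intro hs b hb hhs
    simp only [List.foldl_cons]
    have hhn := heights_nonneg n c row hs hhs
    have hlh : ((List.range n).map
        (fun j => if row.getD j 0 = c then hs.getD j 0 + 1 else 0)).length = n := by simp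
    have hK1 := lra_spec _ hhn
    rw [hlh] at hK1
    have hb0 : 0 ≤ bestUpTo ((List.range n).map
        (fun j => if row.getD j 0 = c then hs.getD j 0 + 1 else 0)) n b := by
      rw [bestUpTo_eq_foldl]
      exact le_trans hb (foldl_max_init_le _ b)
    rw [ih _ _ hb0 hhn]
    rw [rowsA_hoist n c rows _ (max 0 (largestRectangleAreaStack _)) (le_max_left 0 _)]
    rw [bestUpTo_hoist _ _ _ hb, ← hK1]
    have hL0 : 0 ≤ largestRectangleAreaStack ((List.range n).map
        (fun j => if row.getD j 0 = c then hs.getD j 0 + 1 else 0)) := by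
      rw [hK1, bestUpTo_eq_foldl]
      exact foldl_max_init_le _ 0
    simp only [Int.max_def]; split_ifs <;> omega

-- A's maximalRectangle as a plain fold (matrix of shape m × m)
theorem MR_eq (mat : List (List Int)) (m : Nat) (hlen : mat.length = m)
    (hrows : ∀ r ∈ mat, r.length = m) (c : Int) :
    maximalRectangle mat c =
    (mat.foldl
      (fun (s : Int × List Int) row =>
        let h := (List.range m).map (fun j => if row.getD j 0 = c then s.2.getD j 0 + 1 else 0)
        (max s.1 (largestRectangleAreaStack h), h))
      (0, List.replicate m 0)).1 := by
  cases mat with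
  | nil =>
    rw [maximalRectangle]
    simp
  | cons r0 rs =>
    unfold maximalRectangle
    rw [if_neg (by simp only [List.length_cons]; omega)]
    simp only [List.headD_cons]
    rw [hrows r0 (List.mem_cons_self ..)]

-- the per-color fold: B's threaded global best equals A's per-color maxima
theorem colors_fold (mat : List (List Int)) (m : Nat) (hlen : mat.length = m)
    (hrows : ∀ r ∈ mat, r.length = m) :
    ∀ (cs : List Int) (b : Int), 0 ≤ b →
    cs.foldl (fun best c =>
      (mat.foldl
        (fun (s : Int × List Int) row =>
          let h := (List.range m).map (fun j => if row.getD j 0 = c then s.2.getD j 0 + 1 else 0)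
          (bestUpTo h m s.1, h))
        (best, List.replicate m 0)).1) b
    = cs.foldl (fun res c => max res (maximalRectangle mat c)) b := by
  intro cs
  induction cs with
  | nil => intro b _; rfl
  | cons c cs ih =>
    intro b hb
    simp only [List.foldl_cons]
    have hBrow := rowsB_eq m c mat (List.replicate m 0) b hb
      (by intro x hx; rw [List.eq_of_mem_replicate hx])
    rw [hBrow, ← MR_eq mat m hlen hrows c]
    exact ih (max b (maximalRectangle mat c)) (le_trans hb (le_max_left _ _))

-- ===== VERDICT =====
theorem process_spec : Claim_equal_process := by
  intro arr N _ hpre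
  unfold Spec_process
  obtain ⟨hne, hrows5⟩ := hpre
  have hrne : ∀ r ∈ arr, r ≠ [] := by
    intro r hr hcon
    have := (hrows5 r hr).1
    rw [hcon] at this
    simp at this
  unfold process process_alt
  simp only []
  rw [min_flat_eq arr hne hrne]
  set mi := (PySem.List.min? (arr.map (fun r => (PySem.List.min? r (fun x => x)).getD 0))
    (fun x => x)).getD 0 with hmi
  set arr2 := if mi < 0 then arr.map (fun r => r.map (fun x => x + 1)) else arr with harr2
  have harr2ne : arr2 ≠ [] := by
    rw [harr2]
    split_ifs
    · simpa using hne
    · exact hne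
  have harr2rne : ∀ r ∈ arr2, r ≠ [] := by
    rw [harr2]
    split_ifs
    · intro r hr
      obtain ⟨r0, hr0, rfl⟩ := List.mem_map.1 hr
      simpa using hrne r0 hr0
    · exact hrne
  rw [max_flat_eq arr2 harr2ne harr2rne]
  set mx := (PySem.List.max? (arr2.map (fun r => (PySem.List.max? r (fun x => x)).getD 0))
    (fun x => x)).getD 0 with hmx
  obtain ⟨hml, hmr⟩ := rasterize_shape arr2 mx.toNat
  exact (colors_fold (rasterize arr2 mx.toNat).1 mx.toNat hml hmr
    (rasterize arr2 mx.toNat).2 0 (le_refl 0)).symm
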